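-- pv_equiv track=rewrite | github.com/lara-ocon/P2B1_Recomendador | Practica2/recomendador.py | eliminar_peor_elemento
-- ===== SOURCE A (Python) =====
-- def eliminar_peor_elemento(dict):
--
--     llaves = list(dict.keys())
--     peor_v = dict[llaves[0]]
--     peor_llave = llaves[0]
--
--     for i in range(1, len(llaves)):
--         if dict[llaves[i]] < peor_v:
--             peor_v = dict[llaves[i]]
--             peor_llave = llaves[i]
--
--     del dict[peor_llave]
--     return dict
-- ===== SOURCE B (Python) =====
-- def eliminar_peor_elemento(dict):
--     # Stable sort of the keys by their values: the first key of the sorted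
--     # order is the first key attaining the minimum value (Timsort is stable).
--     orden = sorted(dict, key=dict.get)
--     del dict[orden[0]]
--     return dict
-- ===== Notes on version B (the rewrite author's own statement) =====
-- stated objective: idiomatic
-- what changed: Replaces the manual index loop that scans for the minimum value with a stable sort of the keys by their values (sorted(dict, key=dict.get)), deleting the first key of that order; stability preserves A's first-wins tie-breaking.
import Mathlib
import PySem

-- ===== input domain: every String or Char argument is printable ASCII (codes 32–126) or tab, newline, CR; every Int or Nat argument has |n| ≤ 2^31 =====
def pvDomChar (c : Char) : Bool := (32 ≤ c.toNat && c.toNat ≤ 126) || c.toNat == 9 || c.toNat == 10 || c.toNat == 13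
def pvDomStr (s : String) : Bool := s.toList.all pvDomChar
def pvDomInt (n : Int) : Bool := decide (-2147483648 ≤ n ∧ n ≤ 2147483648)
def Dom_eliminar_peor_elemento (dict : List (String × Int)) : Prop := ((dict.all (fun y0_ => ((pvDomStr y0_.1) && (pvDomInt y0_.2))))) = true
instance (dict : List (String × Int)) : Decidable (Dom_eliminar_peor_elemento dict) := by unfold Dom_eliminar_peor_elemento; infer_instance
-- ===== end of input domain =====

-- B replaces A's manual minimum-scan by a stable sort of the keys by their values
-- (first key of the sorted order = first key with the minimal value); same return value,
-- and both mutate the argument in place in Python (equivalence here is about the return value).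


-- dict[k]: the keys looked up always come from the dict itself, so the KeyError default 0 is never used
def pvVal (d : List (String × Int)) (k : String) : Int := (PySem.Dict.mk d).getD k 0

-- ===== PORT A =====
def eliminar_peor_elemento (dict : List (String × Int)) : List (String × Int) :=
  let llaves := dict.map (·.1)
  match llaves with
  | [] => []            -- llaves[0] raises IndexError in Python; excluded by Pre_
  | k0 :: _ =>
    let st := (PySem.List.pyRange 1 (PySem.List.len llaves) 1).foldl
      (fun st i =>
        let k := PySem.List.pyGetD llaves i ""
        if pvVal dict k < st.1 then (pvVal dict k, k) else st)
      (pvVal dict k0, k0)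
    ((PySem.Dict.mk dict).erase st.2).items

-- ===== PORT B =====
def eliminar_peor_elemento_alt (dict : List (String × Int)) : List (String × Int) :=
  let orden := PySem.List.sorted (dict.map (·.1)) (fun k => pvVal dict k) false
  match orden with
  | [] => []            -- orden[0] raises IndexError in Python; excluded by Pre_
  | worst :: _ => ((PySem.Dict.mk dict).erase worst).items

-- ===== PRECONDITION & SPEC =====
-- A (and B) raise IndexError on an empty dict; Pre_ excludes exactly that input.
def Pre_eliminar_peor_elemento (dict : List (String × Int)) : Prop := dict ≠ []
instance (dict : List (String × Int)) : Decidable (Pre_eliminar_peor_elemento dict) := by unfold Pre_eliminar_peor_elemento; infer_instance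
def pvWitness_eliminar_peor_elemento : (List (String × Int)) := [("a", 1), ("b", 0)]

def Spec_eliminar_peor_elemento (dict : List (String × Int)) (out : List (String × Int)) : Prop := out = eliminar_peor_elemento_alt dict
instance (dict : List (String × Int)) (out : List (String × Int)) : Decidable (Spec_eliminar_peor_elemento dict out) := by unfold Spec_eliminar_peor_elemento; infer_instance

-- ===== CLAIM (what is proved, stated in full; the proofs are below) =====
def Claim_equal_eliminar_peor_elemento : Prop := ∀ (dict : List (String × Int)), Dom_eliminar_peor_elemento dict → Pre_eliminar_peor_elemento dict → Spec_eliminar_peor_elemento dict (eliminar_peor_elemento dict)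

-- ===== LEMMAS AND PROOFS =====

-- first key attaining the minimum value, as A's loop computes it
def pvFm {α : Type} (key : α → Int) (m : α) (xs : List α) : α :=
  xs.foldl (fun b y => if key y < key b then y else b) m

-- A's loop carries the pair (best value, best key); its second component is pvFm.
theorem pvFm_pair {α : Type} (key : α → Int) (xs : List α) (m : α) :
    xs.foldl (fun st y => if key y < st.1 then (key y, y) else st) (key m, m)
      = (key (pvFm key m xs), pvFm key m xs) := by
  induction xs generalizing m with
  | nil => rfl
  | cons x xs ih =>
    show List.foldl _ (if key x < key m then (key x, x) else (key m, m)) xs = _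
    have hp : pvFm key m (x :: xs) = pvFm key (if key x < key m then x else m) xs := rfl
    rw [hp]
    split_ifs with h
    · exact ih x
    · exact ih m

-- the head of the stable insertion-sort fold is the first argmin of the accumulated elements
theorem pvHead_insertBy_fold {α : Type} (key : α → Int) (xs : List α) :
    ∀ (m : α) (t : List α), ∃ t',
      xs.foldl (fun acc x => PySem.List.insertBy (fun a b => decide (key a < key b)) x acc) (m :: t)
        = pvFm key m xs :: t' := by
  induction xs with
  | nil => intro m t; exact ⟨t, rfl⟩
  | cons x xs ih =>
    intro m t
    simp only [List.foldl_cons, PySem.List.insertBy]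
    by_cases h : key x < key m
    · simpa [pvFm, h] using ih x (m :: t)
    · simpa [pvFm, h] using ih m (PySem.List.insertBy (fun a b => decide (key a < key b)) x t)

theorem pvHead_sorted {α : Type} (key : α → Int) (m : α) (xs : List α) :
    ∃ t', PySem.List.sorted (m :: xs) key false = pvFm key m xs :: t' := by
  rw [PySem.List.sorted_eq_foldl_insertBy]
  simpa using pvHead_insertBy_fold key xs m []

-- ===== VERDICT (by name: the statement is the Claim_ definition above) =====
theorem eliminar_peor_elemento_spec : Claim_equal_eliminar_peor_elemento := by
  intro dict _ hpre
  unfold Spec_eliminar_peor_elemento eliminar_peor_elemento eliminar_peor_elemento_alt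
  cases dict with
  | nil => exact absurd rfl hpre
  | cons p rest =>
    simp only [List.map_cons]
    obtain ⟨t', ht⟩ := pvHead_sorted (fun k => pvVal (p :: rest) k) p.1 (rest.map (·.1))
    rw [ht]
    have := PySem.List.foldl_pyRange_pyGetD' (xs := p.1 :: rest.map (·.1)) (d := "")
      (f := fun st k => if pvVal (p :: rest) k < st.1 then (pvVal (p :: rest) k, k) else st)
      (init := (pvVal (p :: rest) p.1, p.1)) (a := 1) (by norm_num)
    simp only [PySem.List.len] at this ⊢
    rw [this]
    simp [pvFm_pair, pvFm]
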